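-- pv_equiv track=rewrite | github.com/silune/Connect4 | connect4.py | count_attack_list
-- ===== SOURCE A (Python) =====
-- def count_attack_list(list, n):
--     """Compte le nombre d'attaques sur une ligne / colone / diagonale (list) et renvoie le nombre d'attaques pour chaques joueurs : (j1, j2)"""
--     attacks = []
--     indexStart = 0
--     indexEnd = 0
--     consecutive = 1
--     for i in range(len(list) - 1):
--         if list[i] == list[i+1]:
--             if consecutive == 1:
--                 indexStart = i
--             consecutive += 1
--         else:
--             if consecutive >= n:
--                 indexEnd = i
--                 if indexStart > 0:
--                     if list[indexStart - 1] == 0: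
--                         if not (indexStart - 1, list[indexStart]) in attacks:
--                             attacks.append((indexStart - 1, list[indexStart]))
--                 if list[indexEnd +1] == 0:
--                     if not (indexEnd + 1, list[indexEnd]) in attacks:
--                         attacks.append((indexEnd + 1, list[indexEnd]))
--             consecutive = 1
--     if consecutive >= n:
--         if indexStart > 0:
--             if list[indexStart - 1] == 0:
--                 if not (indexStart - 1, list[indexStart]) in attacks:
--                     attacks.append((indexStart - 1, list[indexStart]))
--     attacks1 = len([e for e in attacks if e[1] == 1])
--     attacks2 = len(attacks) - attacks1
--     return (attacks1, attacks2)
-- ===== SOURCE B (Python) =====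
-- def count_attack_list(list, n):
--     """Compte le nombre d'attaques sur une ligne / colone / diagonale (list) et renvoie le nombre d'attaques pour chaques joueurs : (j1, j2)"""
--     # Scan maximal runs directly: s is the start of a run, e its end; check the
--     # two neighbouring cells of each long-enough run symmetrically.
--     attacks = set()
--     s = 0
--     while s < len(list):
--         e = s
--         while e + 1 < len(list) and list[e + 1] == list[e]:
--             e += 1
--         if e - s + 1 >= n:
--             if s > 0 and list[s - 1] == 0:
--                 attacks.add((s - 1, list[s]))
--             if e + 1 < len(list) and list[e + 1] == 0:
--                 attacks.add((e + 1, list[s]))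
--         s = e + 1
--     attacks1 = sum(1 for (_, v) in attacks if v == 1)
--     return (attacks1, len(attacks) - attacks1)
-- ===== Notes on version B (the rewrite author's own statement) =====
-- stated objective: simpler
-- what changed: B scans maximal runs directly with nested while-loops (run start s, run end e) and records attack cells in a set, checking the two neighbouring cells of each long-enough run symmetrically, instead of A's single indexed pass with a consecutive-counter state machine, a stale indexStart/indexEnd pair, a dedup-by-membership list and a separate post-loop block.
-- intended difference: When n <= 1 and some isolated cell (a maximal run of length 1) has a 0 neighbour, A's left-boundary check reads the stale indexStart left over from an earlier longer run and silently drops the attack cell to the left of such an isolated cell (e.g. A([1,0,2],1)=(1,0)), while B counts it ((1,1)), which is the evident intent of the check. — e.g. on count_attack_list([1, 0, 2], 1): A returns (1, 0), B returns (1, 1)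
import Mathlib
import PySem

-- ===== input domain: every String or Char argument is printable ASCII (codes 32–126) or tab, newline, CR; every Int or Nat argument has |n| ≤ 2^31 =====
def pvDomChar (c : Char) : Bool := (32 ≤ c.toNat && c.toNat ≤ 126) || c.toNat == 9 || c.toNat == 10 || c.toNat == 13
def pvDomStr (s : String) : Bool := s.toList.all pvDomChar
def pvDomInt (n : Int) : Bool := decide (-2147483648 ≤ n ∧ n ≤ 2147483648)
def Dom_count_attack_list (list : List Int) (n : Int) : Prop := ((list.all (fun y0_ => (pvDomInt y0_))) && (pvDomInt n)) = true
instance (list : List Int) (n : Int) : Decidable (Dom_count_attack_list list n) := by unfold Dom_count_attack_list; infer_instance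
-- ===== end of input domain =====

-- B re-implements the count by scanning maximal runs with nested while-loops and a set
-- of attack cells, replacing A's single indexed pass with its consecutive-counter state
-- machine and post-loop block (objective: simpler; return value only, no mutation).

-- ===== PORT A =====
-- list[i] for an index A's loop guarantees in range (0 ≤ i < len)
def pvGetA (l : List Int) (i : Nat) : Int := l.getD i 0

-- one iteration of A's `for i in range(len(list) - 1)` over state (attacks, indexStart, indexEnd, consecutive)
def aStep (L : List Int) (n : Int) (st : List (Int × Int) × Nat × Nat × Nat) (i : Nat) :
    List (Int × Int) × Nat × Nat × Nat :=
  match st with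
  | (att, iS, iE, cons) =>
    if pvGetA L i = pvGetA L (i + 1) then
      (att, if cons = 1 then i else iS, iE, cons + 1)
    else
      if (cons : Int) ≥ n then
        let att1 := if 0 < iS ∧ pvGetA L (iS - 1) = 0 ∧ ((iS : Int) - 1, pvGetA L iS) ∉ att
                    then att ++ [((iS : Int) - 1, pvGetA L iS)] else att
        let att2 := if pvGetA L (i + 1) = 0 ∧ ((i : Int) + 1, pvGetA L i) ∉ att1
                    then att1 ++ [((i : Int) + 1, pvGetA L i)] else att1
        (att2, iS, i, 1)
      else (att, iS, iE, 1)

-- A's block after the loop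
def aFinal (L : List Int) (n : Int) (st : List (Int × Int) × Nat × Nat × Nat) : List (Int × Int) :=
  match st with
  | (att, iS, _, cons) =>
    if (cons : Int) ≥ n ∧ 0 < iS ∧ pvGetA L (iS - 1) = 0 ∧ ((iS : Int) - 1, pvGetA L iS) ∉ att
    then att ++ [((iS : Int) - 1, pvGetA L iS)] else att

def count_attack_list (list : List Int) (n : Int) : Int × Int :=
  let attF := aFinal list n ((List.range (list.length - 1)).foldl (aStep list n) ([], 0, 0, 1))
  let attacks1 : Int := (attF.filter (fun e => e.2 == 1)).length
  (attacks1, (attF.length : Int) - attacks1)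

-- ===== PORT B =====
-- inner `while e + 1 < len(list) and list[e + 1] == list[e]: e += 1` (fuel ≥ len suffices)
def bRunEnd (L : List Int) : Nat → Nat → Nat
  | 0, e => e
  | fuel + 1, e =>
    if e + 1 < L.length ∧ L.getD (e + 1) 0 = L.getD e 0 then bRunEnd L fuel (e + 1) else e

-- outer `while s < len(list)` of B, carrying the attack set (fuel ≥ len + 1 suffices)
def bLoop (L : List Int) (n : Int) : Nat → PySem.Set (Int × Int) → Nat → PySem.Set (Int × Int)
  | 0, att, _ => att
  | fuel + 1, att, s =>
    if s < L.length then
      let e := bRunEnd L L.length s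
      let att2 :=
        if (e : Int) - s + 1 ≥ n then
          let att1 := if 0 < s ∧ L.getD (s - 1) 0 = 0
                      then PySem.Set.add att ((s : Int) - 1, L.getD s 0) else att
          if e + 1 < L.length ∧ L.getD (e + 1) 0 = 0
          then PySem.Set.add att1 ((e : Int) + 1, L.getD s 0) else att1
        else att
      bLoop L n fuel att2 (e + 1)
    else att

def count_attack_list_alt (list : List Int) (n : Int) : Int × Int :=
  let attacks := bLoop list n (list.length + 1) PySem.Set.empty 0
  let attacks1 : Int := attacks.countP (fun p => p.2 == 1)
  (attacks1, (attacks.length : Int) - attacks1)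

-- ===== PRECONDITION & SPEC =====
-- When n ≤ 1 and some isolated cell (a maximal run of length 1) has a 0 neighbour, A's
-- left-boundary check reads the stale indexStart left over from an earlier longer run and
-- silently drops the attack cell to the left of such an isolated cell; B counts it, which
-- is the evident intent of the check.
def D_count_attack_list (list : List Int) (n : Int) : Prop :=
  n ≤ 1 ∧ ∃ i < list.length,
    (i = 0 ∨ list.getD (i - 1) 0 ≠ list.getD i 0) ∧
    (i + 1 = list.length ∨ list.getD (i + 1) 0 ≠ list.getD i 0) ∧
    ((0 < i ∧ list.getD (i - 1) 0 = 0) ∨ (i + 1 < list.length ∧ list.getD (i + 1) 0 = 0))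
instance (list : List Int) (n : Int) : Decidable (D_count_attack_list list n) := by
  unfold D_count_attack_list; infer_instance

def Spec_count_attack_list (list : List Int) (n : Int) (out : Int × Int) : Prop :=
  ¬ D_count_attack_list list n → out = count_attack_list_alt list n
instance (list : List Int) (n : Int) (out : Int × Int) : Decidable (Spec_count_attack_list list n out) := by
  unfold Spec_count_attack_list; infer_instance

def pvDiffWitness_count_attack_list : List Int × Int := ([1, 0, 2], 1)
def pvDiffWitnessOut_count_attack_list : (Int × Int) × (Int × Int) := ((1, 0), (1, 1))

-- ===== CLAIM (what is proved, stated in full; the proofs are below) =====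
def Claim_unchanged_count_attack_list : Prop := ∀ (list : List Int) (n : Int), Dom_count_attack_list list n → Spec_count_attack_list list n (count_attack_list list n)
def Claim_changed_count_attack_list : Prop := Dom_count_attack_list (pvDiffWitness_count_attack_list.1) (pvDiffWitness_count_attack_list.2) ∧ D_count_attack_list (pvDiffWitness_count_attack_list.1) (pvDiffWitness_count_attack_list.2) ∧ count_attack_list (pvDiffWitness_count_attack_list.1) (pvDiffWitness_count_attack_list.2) = pvDiffWitnessOut_count_attack_list.1 ∧ count_attack_list_alt (pvDiffWitness_count_attack_list.1) (pvDiffWitness_count_attack_list.2) = pvDiffWitnessOut_count_attack_list.2 ∧ pvDiffWitnessOut_count_attack_list.1 ≠ pvDiffWitnessOut_count_attack_list.2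

-- ===== LEMMAS AND PROOFS =====

theorem bRunEnd_ge (L : List Int) : ∀ f e, e ≤ bRunEnd L f e := by
  intro f
  induction f with
  | zero => intro e; simp [bRunEnd]
  | succ f ih =>
    intro e
    rw [bRunEnd]
    split
    · exact le_trans (by omega) (ih (e + 1))
    · exact le_refl e

theorem bRunEnd_lt (L : List Int) : ∀ f e, e < L.length → bRunEnd L f e < L.length := by
  intro f
  induction f with
  | zero => intro e h; simpa [bRunEnd] using h
  | succ f ih =>
    intro e h
    rw [bRunEnd]
    split
    · next hc => exact ih (e + 1) hc.1
    · exact h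

theorem bRunEnd_pairs (L : List Int) :
    ∀ f e j, e ≤ j → j < bRunEnd L f e → L.getD j 0 = L.getD (j + 1) 0 := by
  intro f
  induction f with
  | zero => intro e j h1 h2; simp [bRunEnd] at h2; omega
  | succ f ih =>
    intro e j h1 h2
    rw [bRunEnd] at h2
    split at h2
    · next hc =>
      by_cases hje : j = e
      · subst hje; exact hc.2.symm
      · exact ih (e + 1) j (by omega) h2
    · omega

theorem bRunEnd_stop (L : List Int) :
    ∀ f e, L.length - e ≤ f →
      ¬(bRunEnd L f e + 1 < L.length ∧ L.getD (bRunEnd L f e + 1) 0 = L.getD (bRunEnd L f e) 0) := by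
  intro f
  induction f with
  | zero => intro e h; simp [bRunEnd]; omega
  | succ f ih =>
    intro e h
    rw [bRunEnd]
    split
    · next hc => exact ih (e + 1) (by omega)
    · next hc => exact hc

theorem bRunEnd_val (L : List Int) :
    ∀ f e j, e ≤ j → j ≤ bRunEnd L f e → L.getD j 0 = L.getD e 0 := by
  intro f
  induction f with
  | zero =>
    intro e j h1 h2
    simp [bRunEnd] at h2
    have : j = e := by omega
    subst this; rfl
  | succ f ih =>
    intro e j h1 h2
    rw [bRunEnd] at h2
    split at h2
    · next hc =>
      by_cases hje : j = e
      · subst hje; rfl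
      · exact (ih (e + 1) j (by omega) h2).trans hc.2
    · have : j = e := by omega
      subst this; rfl

theorem aSteps_c2 (L : List Int) (n : Int) :
    ∀ k a att iS iE c, 2 ≤ c →
      (∀ j, a ≤ j → j < a + k → L.getD j 0 = L.getD (j + 1) 0) →
      (List.range' a k).foldl (aStep L n) (att, iS, iE, c) = (att, iS, iE, c + k) := by
  intro k
  induction k with
  | zero => intro a att iS iE c _ _; simp [List.range']
  | succ k ih =>
    intro a att iS iE c hc hp
    rw [List.range'_succ, List.foldl_cons]
    have hstep : aStep L n (att, iS, iE, c) a = (att, iS, iE, c + 1) := by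
      have : pvGetA L a = pvGetA L (a + 1) := hp a (le_refl a) (by omega)
      simp [aStep, this, Nat.ne_of_gt (by omega : 1 < c)]
    rw [hstep, ih (a + 1) att iS iE (c + 1) (by omega) (fun j h1 h2 => hp j (by omega) (by omega))]
    have hc1 : c + 1 + k = c + (k + 1) := by omega
    rw [hc1]

theorem aSteps_run (L : List Int) (n : Int) :
    ∀ k a att iS iE,
      (∀ j, a ≤ j → j < a + k → L.getD j 0 = L.getD (j + 1) 0) →
      (List.range' a k).foldl (aStep L n) (att, iS, iE, 1) =
        (att, (if k = 0 then iS else a), iE, k + 1) := by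
  intro k a att iS iE hp
  cases k with
  | zero => simp [List.range']
  | succ k =>
    rw [List.range'_succ, List.foldl_cons]
    have hstep : aStep L n (att, iS, iE, 1) a = (att, a, iE, 2) := by
      have : pvGetA L a = pvGetA L (a + 1) := hp a (le_refl a) (by omega)
      simp [aStep, this]
    rw [hstep, aSteps_c2 L n k (a + 1) att a iE 2 (by omega)
      (fun j h1 h2 => hp j (by omega) (by omega))]
    have : 2 + k = k + 1 + 1 := by omega
    rw [this]
    simp

-- membership form of PySem.Set.add
theorem set_add_eq (s : List (Int × Int)) (x : Int × Int) :
    PySem.Set.add s x = if x ∈ s then s else s ++ [x] := by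
  simp [PySem.Set.add, PySem.Set.contains]

-- B's per-run update of the attack set, factored out of one unfolding of bLoop
def bAtt (L : List Int) (n : Int) (att : List (Int × Int)) (s : Nat) : List (Int × Int) :=
  let e := bRunEnd L L.length s
  if (e : Int) - s + 1 ≥ n then
    let att1 := if 0 < s ∧ L.getD (s - 1) 0 = 0
                then PySem.Set.add att ((s : Int) - 1, L.getD s 0) else att
    if e + 1 < L.length ∧ L.getD (e + 1) 0 = 0
    then PySem.Set.add att1 ((e : Int) + 1, L.getD s 0) else att1
  else att

theorem bLoop_step (L : List Int) (n : Int) (f : Nat) (att : PySem.Set (Int × Int)) (s : Nat)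
    (hs : s < L.length) :
    bLoop L n (f + 1) att s = bLoop L n f (bAtt L n att s) (bRunEnd L L.length s + 1) := by
  rw [bLoop, if_pos hs]; rfl

theorem bLoop_done (L : List Int) (n : Int) (f : Nat) (att : PySem.Set (Int × Int)) (s : Nat)
    (hs : ¬ s < L.length) : bLoop L n f att s = att := by
  cases f with
  | zero => rfl
  | succ f => rw [bLoop, if_neg hs]

theorem subset_add (s : List (Int × Int)) (x y : Int × Int) (h : y ∈ s) :
    y ∈ PySem.Set.add s x := by
  rw [set_add_eq]; split <;> simp [h]

theorem mem_add_self (s : List (Int × Int)) (x : Int × Int) : x ∈ PySem.Set.add s x := by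
  rw [set_add_eq]; split <;> simp_all

theorem mem_bAtt_of_mem (L : List Int) (n : Int) (att : List (Int × Int)) (s : Nat)
    (p : Int × Int) (h : p ∈ att) : p ∈ bAtt L n att s := by
  simp only [bAtt]
  split_ifs <;>
    first
      | exact h
      | exact subset_add _ _ _ h
      | exact subset_add _ _ _ (subset_add _ _ _ h)

theorem main_lemma (L : List Int) (n : Int) (hD : ¬ D_count_attack_list L n) :
    ∀ f s att iS iE, L.length - s < f → s < L.length →
    (0 < s → L.getD (s - 1) 0 ≠ L.getD s 0) →
    (0 < iS → L.getD (iS - 1) 0 = 0 → (1 : Int) ≥ n → ((iS : Int) - 1, L.getD iS 0) ∈ att) →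
    aFinal L n ((List.range' s (L.length - 1 - s)).foldl (aStep L n) (att, iS, iE, 1)) =
      bLoop L n f att s := by
  intro f
  induction f with
  | zero => intro s att iS iE hf; omega
  | succ f ih =>
    intro s att iS iE hf hs hrs hinv
    have hge := bRunEnd_ge L L.length s
    have hlt := bRunEnd_lt L L.length s hs
    have hstop := bRunEnd_stop L L.length s (by omega)
    have hpairs := bRunEnd_pairs L L.length s
    have hvale : L.getD (bRunEnd L L.length s) 0 = L.getD s 0 :=
      bRunEnd_val L L.length s (bRunEnd L L.length s) hge (le_refl _)
    rw [bLoop_step L n f att s hs]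
    set e := bRunEnd L L.length s with he
    -- abbreviations for B's two candidate updates
    set attL := (if 0 < s ∧ L.getD (s - 1) 0 = 0
                 then PySem.Set.add att ((s : Int) - 1, L.getD s 0) else att) with hattL
    have hbAtt : bAtt L n att s =
        (if (e : Int) - s + 1 ≥ n then
          (if e + 1 < L.length ∧ L.getD (e + 1) 0 = 0
           then PySem.Set.add attL ((e : Int) + 1, L.getD s 0) else attL)
         else att) := by
      rw [bAtt, ← he, hattL]
    -- the two add-equalities shared by both cases
    have hleft2 : ¬ (e - s = 0) →
        (if 0 < s ∧ L.getD (s - 1) 0 = 0 ∧ ((s : Int) - 1, L.getD s 0) ∉ att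
         then att ++ [((s : Int) - 1, L.getD s 0)] else att) = attL := by
      intro _
      rw [hattL]
      by_cases hc : 0 < s ∧ L.getD (s - 1) 0 = 0
      · rw [if_pos hc, set_add_eq]
        by_cases hmem : ((s : Int) - 1, L.getD s 0) ∈ att
        · have hn : ¬ (0 < s ∧ L.getD (s - 1) 0 = 0 ∧ ((s : Int) - 1, L.getD s 0) ∉ att) :=
            fun h => h.2.2 hmem
          rw [if_pos hmem, if_neg hn]
        · rw [if_neg hmem, if_pos ⟨hc.1, hc.2, hmem⟩]
      · have hn : ¬ (0 < s ∧ L.getD (s - 1) 0 = 0 ∧ ((s : Int) - 1, L.getD s 0) ∉ att) :=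
          fun h => hc ⟨h.1, h.2.1⟩
        rw [if_neg hn, if_neg hc]
    by_cases hlast : e + 1 = L.length
    · -- the final run: the fold has no boundary step; A's post-loop block applies
      have hk : L.length - 1 - s = e - s := by omega
      rw [hk, aSteps_run L n (e - s) s att iS iE (fun j h1 h2 => hpairs j h1 (by omega))]
      rw [bLoop_done L n f _ _ (by omega), hbAtt]
      have hc2 : ¬ (e + 1 < L.length ∧ L.getD (e + 1) 0 = 0) := fun h => by omega
      by_cases hq : (e : Int) - (s : Int) + 1 ≥ n
      · rw [if_pos hq, if_neg hc2]
        by_cases h0 : e - s = 0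
        · -- run of length 1: n ≤ 1; A's stale indexStart duplicates, B's add is excluded by ¬D_
          have hn1 : n ≤ 1 := by omega
          rw [if_pos h0]
          simp only [aFinal, pvGetA]
          have hA : ¬ (((e - s + 1 : Nat) : Int) ≥ n ∧ 0 < iS ∧ L.getD (iS - 1) 0 = 0 ∧
              ((iS : Int) - 1, L.getD iS 0) ∉ att) := by
            rintro ⟨-, hiS, hz, hnm⟩
            exact hnm (hinv hiS hz (by omega))
          have hB : ¬ (0 < s ∧ L.getD (s - 1) 0 = 0) := by
            rintro ⟨hs0, hz0⟩
            exact hD ⟨hn1, s, hs, Or.inr (hrs hs0), Or.inl (by omega), Or.inl ⟨hs0, hz0⟩⟩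
          rw [if_neg hA, hattL, if_neg hB]
        · -- run of length ≥ 2: indexStart is the true run start; both sides do the same add
          rw [if_neg h0]
          simp only [aFinal, pvGetA]
          have hcast : (((e - s + 1 : Nat) : Int) ≥ n) := by omega
          have hA : ((((e - s + 1 : Nat) : Int) ≥ n ∧ 0 < s ∧ L.getD (s - 1) 0 = 0 ∧
              ((s : Int) - 1, L.getD s 0) ∉ att) ↔
              (0 < s ∧ L.getD (s - 1) 0 = 0 ∧ ((s : Int) - 1, L.getD s 0) ∉ att)) := by
            constructor
            · rintro ⟨-, h⟩; exact h
            · intro h; exact ⟨hcast, h⟩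
          rw [if_congr hA rfl rfl, hleft2 h0]
      · -- run too short: nobody records anything
        rw [if_neg hq]
        simp only [aFinal, pvGetA]
        have hA : ¬ (((e - s + 1 : Nat) : Int) ≥ n ∧ 0 < (if e - s = 0 then iS else s) ∧
            L.getD ((if e - s = 0 then iS else s) - 1) 0 = 0 ∧
            (((if e - s = 0 then iS else s : Nat) : Int) - 1,
              L.getD (if e - s = 0 then iS else s) 0) ∉ att) := by
          rintro ⟨h1, -⟩; omega
        rw [if_neg hA]
    · -- a middle run: boundary step at index e, then the loop continues at e + 1
      have he1 : e + 1 < L.length := by omega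
      have hne : L.getD (e + 1) 0 ≠ L.getD e 0 := fun h => hstop ⟨he1, h⟩
      have hsplit : L.length - 1 - s = (e - s) + (1 + (L.length - 1 - (e + 1))) := by omega
      rw [hsplit, ← List.range'_append_1, show s + (e - s) = e from by omega,
        show 1 + (L.length - 1 - (e + 1)) = (L.length - 1 - (e + 1)) + 1 from by omega,
        List.range'_succ, List.foldl_append, List.foldl_cons,
        aSteps_run L n (e - s) s att iS iE (fun j h1 h2 => hpairs j h1 (by omega))]
      have hstep : ∃ iE2, aStep L n (att, if e - s = 0 then iS else s, iE, e - s + 1) e =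
          (bAtt L n att s, (if e - s = 0 then iS else s), iE2, 1) := by
        have hnoteq : ¬ (pvGetA L e = pvGetA L (e + 1)) := fun h => hne h.symm
        simp only [aStep, pvGetA] at hnoteq ⊢
        rw [if_neg hnoteq, hbAtt]
        by_cases hq : (e : Int) - (s : Int) + 1 ≥ n
        · refine ⟨e, ?_⟩
          have hcast : (((e - s + 1 : Nat) : Int) ≥ n) := by omega
          rw [if_pos hcast, if_pos hq]
          congr 1
          have hl : (if (0 < (if e - s = 0 then iS else s) ∧
                L.getD ((if e - s = 0 then iS else s) - 1) 0 = 0 ∧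
                (((if e - s = 0 then iS else s : Nat) : Int) - 1,
                  L.getD (if e - s = 0 then iS else s) 0) ∉ att)
              then att ++ [(((if e - s = 0 then iS else s : Nat) : Int) - 1,
                  L.getD (if e - s = 0 then iS else s) 0)] else att) = attL := by
            by_cases h0 : e - s = 0
            · have hn1 : n ≤ 1 := by omega
              rw [if_pos h0]
              have hA : ¬ (0 < iS ∧ L.getD (iS - 1) 0 = 0 ∧
                  ((iS : Int) - 1, L.getD iS 0) ∉ att) := by
                rintro ⟨hiS, hz, hnm⟩
                exact hnm (hinv hiS hz (by omega))
              have hB : ¬ (0 < s ∧ L.getD (s - 1) 0 = 0) := by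
                rintro ⟨hs0, hz0⟩
                refine hD ⟨hn1, s, hs, Or.inr (hrs hs0), Or.inr ?_, Or.inl ⟨hs0, hz0⟩⟩
                rw [show s + 1 = e + 1 from by omega,
                  show L.getD s 0 = L.getD e 0 from by rw [show e = s from by omega]]
                exact hne
              rw [if_neg hA, hattL, if_neg hB]
            · rw [if_neg h0]
              exact hleft2 h0
          rw [hl, show L.getD e 0 = L.getD s 0 from hvale]
          by_cases hz : L.getD (e + 1) 0 = 0
          · have hcB : (e + 1 < L.length ∧ L.getD (e + 1) 0 = 0) := ⟨he1, hz⟩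
            rw [if_pos hcB, set_add_eq]
            by_cases hmem : ((e : Int) + 1, L.getD s 0) ∈ attL
            · have hA : ¬ (L.getD (e + 1) 0 = 0 ∧ ((e : Int) + 1, L.getD s 0) ∉ attL) :=
                fun h => h.2 hmem
              rw [if_pos hmem, if_neg hA]
            · rw [if_neg hmem, if_pos ⟨hz, hmem⟩]
          · have hA : ¬ (L.getD (e + 1) 0 = 0 ∧ ((e : Int) + 1, L.getD s 0) ∉ attL) :=
              fun h => hz h.1
            have hB : ¬ (e + 1 < L.length ∧ L.getD (e + 1) 0 = 0) := fun h => hz h.2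
            rw [if_neg hA, if_neg hB]
        · refine ⟨iE, ?_⟩
          have hcast : ¬ (((e - s + 1 : Nat) : Int) ≥ n) := by omega
          rw [if_neg hcast, if_neg hq]
      obtain ⟨iE2, hstep⟩ := hstep
      rw [hstep]
      refine ih (e + 1) (bAtt L n att s) _ iE2 (by omega) he1
        (fun _ => by simpa using hne.symm) ?_
      -- the invariant for the continuation
      by_cases h0 : e - s = 0
      · rw [if_pos h0]
        exact fun h1 h2 h3 => mem_bAtt_of_mem L n att s _ (hinv h1 h2 h3)
      · rw [if_neg h0]
        intro hs0 hz0 hn1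
        have hq : (e : Int) - (s : Int) + 1 ≥ n := by omega
        rw [hbAtt, if_pos hq]
        have h1 : ((s : Int) - 1, L.getD s 0) ∈ attL := by
          rw [hattL, if_pos ⟨hs0, hz0⟩]
          exact mem_add_self _ _
        split
        · exact subset_add _ _ _ h1
        · exact h1

-- ===== VERDICT (by name: the statement is the Claim_ definition above) =====
theorem count_attack_list_spec : Claim_unchanged_count_attack_list := by
  unfold Claim_unchanged_count_attack_list
  intro L n _
  unfold Spec_count_attack_list
  intro hD
  simp only [count_attack_list, count_attack_list_alt]
  rw [show PySem.Set.empty = ([] : List (Int × Int)) from rfl]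
  by_cases hL : L.length = 0
  · rw [bLoop_done L n (L.length + 1) [] 0 (by omega), hL]
    simp [aFinal]
  · rw [List.range_eq_range']
    have hmain := main_lemma L n hD (L.length + 1) 0 [] 0 0 (by omega) (by omega)
      (fun h => absurd h (by omega)) (fun h => absurd h (by omega))
    simp only [Nat.sub_zero] at hmain
    rw [hmain, List.countP_eq_length_filter]

theorem count_attack_list_changed : Claim_changed_count_attack_list := by
  unfold Claim_changed_count_attack_list; decide
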